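-- pv_equiv track=rewrite | github.com/matpomies/Simulateur-foules | main.py | trier_entourage
-- ===== SOURCE A (Python) =====
-- def trier_entourage(voisins, case_depart):
--     """Prend la liste des voisins proches pour les trier sur les voisins directement proches en priorité plutôt que
--     ceux sur les coins"""
--     liste_triee = []
--     liste_attente = []
--     for voisin in voisins:  # On ajoute en premier les voisins direct
--         if voisin[0] == case_depart[0] or voisin[1] == case_depart[1]:
--             liste_triee.append(voisin)
--         else:
--             liste_attente.append(voisin)
--     for voisin in liste_attente:  # On ajoute à la fin les voisins dans les coins
--         liste_triee.append(voisin)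
--     return liste_triee
-- ===== SOURCE B (Python) =====
-- def trier_entourage(voisins, case_depart):
--     """Idiomatic: one stable sort with a 0/1 key (direct neighbors before corners),
--     instead of the two-list partition-and-concatenate loop."""
--     return sorted(voisins, key=lambda v: 0 if v[0] == case_depart[0] or v[1] == case_depart[1] else 1)
-- ===== Notes on version B (the rewrite author's own statement) =====
-- stated objective: idiomatic
-- what changed: Replaces the explicit two-accumulator partition loop plus concatenation loop with a single stable sorted() call keyed 0 for row/column-sharing neighbors and 1 for corner neighbors; stability preserves the original relative order within each group.
import Mathlib
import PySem

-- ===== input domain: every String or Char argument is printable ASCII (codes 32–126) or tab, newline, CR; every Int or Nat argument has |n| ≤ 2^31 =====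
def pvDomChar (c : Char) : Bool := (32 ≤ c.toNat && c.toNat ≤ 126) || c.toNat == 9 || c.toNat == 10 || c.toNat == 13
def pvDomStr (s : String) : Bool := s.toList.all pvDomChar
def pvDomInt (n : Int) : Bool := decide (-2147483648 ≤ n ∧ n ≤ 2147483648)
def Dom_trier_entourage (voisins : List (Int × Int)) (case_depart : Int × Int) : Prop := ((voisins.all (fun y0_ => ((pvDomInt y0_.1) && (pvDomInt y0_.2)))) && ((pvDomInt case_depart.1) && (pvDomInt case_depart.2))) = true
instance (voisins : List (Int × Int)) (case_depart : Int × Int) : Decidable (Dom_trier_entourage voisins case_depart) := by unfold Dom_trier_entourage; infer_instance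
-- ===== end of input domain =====

-- B replaces A's two-pass partition-and-append with a single stable sort on a 0/1 key (idiomatic, same result).


-- ===== PORT A =====
-- First loop: partition into liste_triee / liste_attente; second loop: append liste_attente onto liste_triee.
def trier_entourage (voisins : List (Int × Int)) (case_depart : Int × Int) : List (Int × Int) :=
  let acc := voisins.foldl
    (fun (acc : List (Int × Int) × List (Int × Int)) voisin =>
      if voisin.1 = case_depart.1 ∨ voisin.2 = case_depart.2 then
        (acc.1 ++ [voisin], acc.2)
      else
        (acc.1, acc.2 ++ [voisin]))
    ([], [])
  acc.2.foldl (fun liste_triee voisin => liste_triee ++ [voisin]) acc.1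

-- ===== PORT B =====
-- single stable sort with key 0 (direct neighbor) / 1 (corner neighbor)
def trier_entourage_alt (voisins : List (Int × Int)) (case_depart : Int × Int) : List (Int × Int) :=
  PySem.List.sorted voisins
    (fun v => if v.1 = case_depart.1 ∨ v.2 = case_depart.2 then (0 : Int) else 1) false

-- ===== PRECONDITION & SPEC =====
def Spec_trier_entourage (voisins : List (Int × Int)) (case_depart : Int × Int) (out : List (Int × Int)) : Prop := out = trier_entourage_alt voisins case_depart
instance (voisins : List (Int × Int)) (case_depart : Int × Int) (out : List (Int × Int)) : Decidable (Spec_trier_entourage voisins case_depart out) := by unfold Spec_trier_entourage; infer_instance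

-- ===== CLAIM (what is proved, stated in full; the proofs are below) =====
def Claim_equal_trier_entourage : Prop := ∀ (voisins : List (Int × Int)) (case_depart : Int × Int), Dom_trier_entourage voisins case_depart → Spec_trier_entourage voisins case_depart (trier_entourage voisins case_depart)

-- ===== LEMMAS AND PROOFS =====

-- appending each element one-by-one is list append
theorem pv_foldl_append {α : Type} (a t : List α) :
    a.foldl (fun acc v => acc ++ [v]) t = t ++ a := by
  induction a generalizing t with
  | nil => simp
  | cons x xs ih => simp [List.foldl, ih, List.append_assoc]

-- A's partition loop, characterised by filters
theorem pv_partition_loop (p : (Int × Int) → Prop) [DecidablePred p]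
    (xs : List (Int × Int)) (t a : List (Int × Int)) :
    xs.foldl
      (fun (acc : List (Int × Int) × List (Int × Int)) v =>
        if p v then (acc.1 ++ [v], acc.2) else (acc.1, acc.2 ++ [v])) (t, a)
      = (t ++ xs.filter (fun v => decide (p v)), a ++ xs.filter (fun v => !decide (p v))) := by
  induction xs generalizing t a with
  | nil => simp
  | cons x xs ih =>
    by_cases hx : p x <;> simp [List.foldl, hx, ih, List.append_assoc]

-- inserting a key-0 element into (all-key-0 prefix ++ all-key-1 suffix) puts it between them
theorem pv_insertBy_zero (p : (Int × Int) → Prop) [DecidablePred p]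
    (x : Int × Int) (hx : p x) (F0 F1 : List (Int × Int))
    (h0 : ∀ y ∈ F0, p y) (h1 : ∀ y ∈ F1, ¬ p y) :
    PySem.List.insertBy
      (fun a b => decide ((if p a then (0 : Int) else 1) < (if p b then (0 : Int) else 1)))
      x (F0 ++ F1)
      = F0 ++ x :: F1 := by
  induction F0 with
  | nil =>
    cases F1 with
    | nil => simp [PySem.List.insertBy]
    | cons z zs =>
      have hz : ¬ p z := h1 z (by simp)
      simp [PySem.List.insertBy, hx, hz]
  | cons y ys ih =>
    have hy : p y := h0 y (by simp)
    simp [PySem.List.insertBy, hx, hy, ih (fun z hz => h0 z (by simp [hz]))]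

-- B's insertion-sort fold, characterised by filters
theorem pv_sort_loop (p : (Int × Int) → Prop) [DecidablePred p]
    (xs F0 F1 : List (Int × Int)) (h0 : ∀ y ∈ F0, p y) (h1 : ∀ y ∈ F1, ¬ p y) :
    xs.foldl
      (fun acc x => PySem.List.insertBy
        (fun a b => decide ((if p a then (0 : Int) else 1) < (if p b then (0 : Int) else 1))) x acc)
      (F0 ++ F1)
      = F0 ++ xs.filter (fun v => decide (p v)) ++ F1 ++ xs.filter (fun v => !decide (p v)) := by
  induction xs generalizing F0 F1 with
  | nil => simp [List.append_assoc]
  | cons x xs ih =>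
    by_cases hx : p x
    · have step := pv_insertBy_zero p x hx F0 F1 h0 h1
      have h0' : ∀ y ∈ F0 ++ [x], p y := by
        intro y hy
        rcases List.mem_append.mp hy with h | h
        · exact h0 y h
        · simp at h; subst h; exact hx
      rw [List.foldl_cons, step, show F0 ++ x :: F1 = (F0 ++ [x]) ++ F1 by simp,
        ih (F0 ++ [x]) F1 h0' h1]
      simp [hx, List.append_assoc]
    · have step : PySem.List.insertBy
          (fun a b => decide ((if p a then (0 : Int) else 1) < (if p b then (0 : Int) else 1)))
          x (F0 ++ F1) = F0 ++ (F1 ++ [x]) := by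
        rw [PySem.List.insertBy_of_forall_not_before _ x (F0 ++ F1) (by
          intro y _
          by_cases hy : p y <;> simp [hx, hy])]
        simp
      have h1' : ∀ y ∈ F1 ++ [x], ¬ p y := by
        intro y hy
        rcases List.mem_append.mp hy with h | h
        · exact h1 y h
        · simp at h; subst h; exact hx
      rw [List.foldl_cons, step, ih F0 (F1 ++ [x]) h0 h1']
      simp [hx, List.append_assoc]

-- ===== VERDICT (by name: the statement is the Claim_ definition above) =====
theorem trier_entourage_spec : Claim_equal_trier_entourage := by
  intro voisins case_depart _
  unfold Spec_trier_entourage trier_entourage trier_entourage_alt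
  rw [PySem.List.sorted_eq_foldl_insertBy]
  rw [pv_partition_loop (fun v => v.1 = case_depart.1 ∨ v.2 = case_depart.2) voisins [] [],
    pv_foldl_append]
  have h := pv_sort_loop (fun v => v.1 = case_depart.1 ∨ v.2 = case_depart.2) voisins [] []
    (by simp) (by simp)
  simp only [List.nil_append, List.append_nil] at h ⊢
  exact h.symm
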